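-- pv_equiv track=rewrite | github.com/fankoyu2019/TGAAL | utils/sorf2features.py | g_bigap_name_list
-- ===== SOURCE A (Python) =====
-- def g_bigap_name_list(g):
--     g_name_list = []
--     nucleobase = ['A', 'T', 'G', 'C']
--     for nucl1 in nucleobase:
--         for nucl2 in nucleobase:
--             for nucl3 in nucleobase:
--                 for nucl4 in nucleobase:
--                     g_name_list.append(nucl1 + nucl2 + '*' * g + nucl3 + nucl4)
--     return g_name_list
-- ===== SOURCE B (Python) =====
-- def g_bigap_name_list(g):
--     letters = 'ATGC'
--     gap = '*' * g
--     return [letters[(i >> 6) & 3] + letters[(i >> 4) & 3] + gap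
--             + letters[(i >> 2) & 3] + letters[i & 3] for i in range(256)]
-- ===== Notes on version B (the rewrite author's own statement) =====
-- stated objective: alternative
-- what changed: Replaces the four nested loops by a single pass over range(256) that decodes each index's four base-4 digits (via bit shifts) into the four nucleotide letters, with the gap string built once.
import Mathlib
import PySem

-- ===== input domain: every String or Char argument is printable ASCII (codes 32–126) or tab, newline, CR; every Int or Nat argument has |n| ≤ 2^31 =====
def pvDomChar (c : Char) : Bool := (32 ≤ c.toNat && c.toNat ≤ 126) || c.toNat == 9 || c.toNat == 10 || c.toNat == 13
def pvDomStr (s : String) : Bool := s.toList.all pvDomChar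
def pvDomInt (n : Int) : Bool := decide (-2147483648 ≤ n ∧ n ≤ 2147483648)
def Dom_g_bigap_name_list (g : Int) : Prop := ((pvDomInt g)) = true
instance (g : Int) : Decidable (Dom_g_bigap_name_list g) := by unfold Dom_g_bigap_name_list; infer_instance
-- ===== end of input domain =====

-- B decodes each index 0..255 into four base-4 digits instead of four nested loops (objective: alternative).

-- ===== PORT A =====
def g_bigap_name_list (g : Int) : List String :=
  let nucleobase : List String := ["A", "T", "G", "C"]
  nucleobase.foldl (fun acc n1 =>
    nucleobase.foldl (fun acc n2 =>
      nucleobase.foldl (fun acc n3 =>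
        nucleobase.foldl (fun acc n4 =>
          acc ++ [(((n1 ++ n2) ++ String.mk (PySem.List.pyRepeat ['*'] g)) ++ n3) ++ n4])
          acc) acc) acc) []

-- ===== PORT B =====
-- letters[k]: k is always (i >>> _) &&& 3 ∈ [0,3], so the 1-char index read is exact.
def pvLetter (k : Nat) : String := (["A", "T", "G", "C"] : List String).getD k ""

def g_bigap_name_list_alt (g : Int) : List String :=
  let gap := String.mk (PySem.List.pyRepeat ['*'] g)
  (List.range 256).map (fun i =>
    (((pvLetter ((i >>> 6) &&& 3) ++ pvLetter ((i >>> 4) &&& 3)) ++ gap) ++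
      pvLetter ((i >>> 2) &&& 3)) ++ pvLetter (i &&& 3))

-- ===== PRECONDITION & SPEC =====
def Spec_g_bigap_name_list (g : Int) (out : List String) : Prop := out = g_bigap_name_list_alt g
instance (g : Int) (out : List String) : Decidable (Spec_g_bigap_name_list g out) := by unfold Spec_g_bigap_name_list; infer_instance

-- ===== CLAIM (what is proved, stated in full; the proofs are below) =====
def Claim_equal_g_bigap_name_list : Prop := ∀ (g : Int), Dom_g_bigap_name_list g → Spec_g_bigap_name_list g (g_bigap_name_list g)

-- ===== LEMMAS AND PROOFS =====
theorem pv_foldl_app {α β : Type} (f : α → List β) :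
    ∀ (l : List α) (init : List β),
      l.foldl (fun acc x => acc ++ f x) init = init ++ l.flatMap f := by
  intro l
  induction l with
  | nil => simp
  | cons x xs ih => intro init; simp [ih]

-- ===== VERDICT (by name: the statement is the Claim_ definition above) =====
set_option maxRecDepth 40000 in
set_option maxHeartbeats 4000000 in
theorem g_bigap_name_list_spec : Claim_equal_g_bigap_name_list := by
  intro g _
  unfold Spec_g_bigap_name_list g_bigap_name_list g_bigap_name_list_alt
  generalize String.mk (PySem.List.pyRepeat ['*'] g) = s
  simp only [pv_foldl_app, List.nil_append]
  refine List.ext_getElem ?_ ?_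
  · rfl
  · intro i h1 h2
    simp only [List.length_map, List.length_range] at h2
    interval_cases i <;> rfl
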